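-- pv_equiv track=rewrite | github.com/NatPath/Deep_learning_technion | hw3/hw3/charnn.py | remove_chars
-- ===== SOURCE A (Python) =====
-- def remove_chars(text: str, chars_to_remove):
--     """
--     Removes all occurrences of the given chars from a text sequence.
--     :param text: The text sequence.
--     :param chars_to_remove: A list of characters that should be removed.
--     :return:
--         - text_clean: the text after removing the chars.
--         - n_removed: Number of chars removed.
--     """
--     # TODO: Implement according to the docstring.
--     # ====== YOUR CODE: ======
--     chars_to_remove_set = set(chars_to_remove)
--     n_removed = 0
--     filtered_chars = []
--     for char in text:
--         if char not in chars_to_remove_set: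
--             filtered_chars.append(char)
--         else:
--             n_removed += 1
--     text_clean = ''.join(filtered_chars)
--     # ========================
--     return text_clean, n_removed
-- ===== SOURCE B (Python) =====
-- def remove_chars(text: str, chars_to_remove):
--     # Staged passes: one str.count + str.replace pass per distinct removal char,
--     # instead of a single character-by-character loop with a counter.
--     text_clean, n_removed = text, 0
--     for ch in dict.fromkeys(chars_to_remove):
--         if len(ch) == 1:
--             n_removed += text_clean.count(ch)
--             text_clean = text_clean.replace(ch, '')
--     return text_clean, n_removed
-- ===== Notes on version B (the rewrite author's own statement) =====
-- stated objective: alternative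
-- what changed: B loops over the distinct removal characters rather than over the text: for each single-character entry it counts its occurrences with str.count and strips them all at once with str.replace, accumulating the count per removal char instead of per text position.
import Mathlib
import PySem

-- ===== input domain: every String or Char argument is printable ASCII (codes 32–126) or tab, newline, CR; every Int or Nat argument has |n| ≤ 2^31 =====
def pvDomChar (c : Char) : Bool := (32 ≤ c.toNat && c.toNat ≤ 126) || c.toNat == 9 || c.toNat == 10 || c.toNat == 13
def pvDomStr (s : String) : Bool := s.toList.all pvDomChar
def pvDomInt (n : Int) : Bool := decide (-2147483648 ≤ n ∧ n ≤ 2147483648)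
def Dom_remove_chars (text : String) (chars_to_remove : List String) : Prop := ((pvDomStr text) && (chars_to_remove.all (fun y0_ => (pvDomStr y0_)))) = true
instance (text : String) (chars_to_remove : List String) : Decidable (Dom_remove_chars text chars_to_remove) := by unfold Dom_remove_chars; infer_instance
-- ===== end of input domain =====

-- B iterates over the distinct removal characters (count + replace per char) instead of A's
-- single character-by-character loop with a counter; same return value, alternative algorithm.

-- ===== PORT A =====
-- loop state: (n_removed, filtered_chars); branches in A's order (keep-branch first, else counter)
def remove_chars (text : String) (chars_to_remove : List String) : String × Int :=
  let chars_to_remove_set : PySem.Set String := PySem.Set.ofList chars_to_remove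
  let st := text.toList.foldl
    (fun (st : Int × List Char) char =>
      if PySem.Set.contains chars_to_remove_set (String.ofList [char]) = false then
        (st.1, st.2 ++ [char])
      else
        (st.1 + 1, st.2))
    (0, [])
  (String.ofList st.2, st.1)

-- ===== PORT B =====
-- loop over dict.fromkeys(chars_to_remove) (= PySem.List.dedup); state (text_clean, n_removed)
def remove_chars_alt (text : String) (chars_to_remove : List String) : String × Int :=
  (PySem.List.dedup chars_to_remove).foldl
    (fun (st : String × Int) ch =>
      if PySem.Str.len ch == 1 then
        (PySem.Str.replace st.1 ch "", st.2 + (PySem.Str.count st.1 ch : Int))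
      else st)
    (text, 0)

-- ===== PRECONDITION & SPEC =====
def Spec_remove_chars (text : String) (chars_to_remove : List String) (out : String × Int) : Prop := out = remove_chars_alt text chars_to_remove
instance (text : String) (chars_to_remove : List String) (out : String × Int) : Decidable (Spec_remove_chars text chars_to_remove out) := by unfold Spec_remove_chars; infer_instance

-- ===== CLAIM (what is proved, stated in full; the proofs are below) =====
def Claim_equal_remove_chars : Prop := ∀ (text : String) (chars_to_remove : List String), Dom_remove_chars text chars_to_remove → Spec_remove_chars text chars_to_remove (remove_chars text chars_to_remove)

-- ===== LEMMAS AND PROOFS =====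

-- ---- single-character facts about Python's str.count / str.replace ----
theorem count_go_single (c : Char) :
    ∀ (fuel : Nat) (l : List Char) (acc : Nat), l.length ≤ fuel →
      PySem.Chars.count.go [c] fuel l acc = acc + l.count c := by
  intro fuel
  induction fuel with
  | zero => intro l acc h; simp at h; simp [h, PySem.Chars.count.go]
  | succ f ih =>
    intro l acc h
    cases l with
    | nil => simp [PySem.Chars.count.go]
    | cons d t =>
      simp at h
      by_cases hc : c = d
      · subst hc
        simp [PySem.Chars.count.go, List.isPrefixOf, ih t _ h]
        omega
      · simp [PySem.Chars.count.go, List.isPrefixOf, hc, ih t _ h, Ne.symm hc]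

theorem replace_go_single (c : Char) :
    ∀ (fuel : Nat) (l : List Char) (acc : List Char), l.length ≤ fuel →
      PySem.Chars.replace.go [c] [] fuel l acc = acc.reverse ++ l.filter (fun x => x != c) := by
  intro fuel
  induction fuel with
  | zero => intro l acc h; simp at h; simp [h, PySem.Chars.replace.go]
  | succ f ih =>
    intro l acc h
    cases l with
    | nil => simp [PySem.Chars.replace.go]
    | cons d t =>
      simp at h
      by_cases hc : c = d
      · subst hc
        simp [PySem.Chars.replace.go, List.isPrefixOf, ih t _ h]
      · simp [PySem.Chars.replace.go, List.isPrefixOf, hc, ih t _ h, Ne.symm hc]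

theorem ofList_toList' (s : String) : String.ofList s.toList = s := by simp

theorem str_count_single (s : String) (c : Char) :
    PySem.Str.count s (String.ofList [c]) = s.toList.count c := by
  have : PySem.Chars.count s.toList [c] = s.toList.count c := by
    simp only [PySem.Chars.count]
    rw [if_neg (by simp)]
    rw [count_go_single c s.toList.length s.toList 0 le_rfl]
    simp
  simpa [PySem.Str.count] using this

theorem str_replace_single (s : String) (c : Char) :
    (PySem.Str.replace s (String.ofList [c]) "").toList = s.toList.filter (fun x => x != c) := by
  have : PySem.Chars.replace s.toList [c] [] = s.toList.filter (fun x => x != c) := by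
    simp only [PySem.Chars.replace]
    rw [if_neg (by simp)]
    rw [replace_go_single c s.toList.length s.toList [] le_rfl]
    simp
  simpa [PySem.Str.toList_replace] using this

-- ---- A's fold: counter = number of dropped chars, buffer = kept chars ----
theorem remove_chars_foldl_inv (q : Char → Bool) (l : List Char) (st : Int × List Char) :
    l.foldl (fun (st : Int × List Char) c => if q c = false then (st.1, st.2 ++ [c]) else (st.1 + 1, st.2)) st
      = (st.1 + ((l.filter q).length : Int), st.2 ++ l.filter (fun c => ! q c)) := by
  induction l generalizing st with
  | nil => simp
  | cons c t ih =>
    by_cases h : q c = true <;> simp [ih, h]; ring_nf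

-- the "kept" predicate for a (suffix of the) removal list
def keepPred (cs : List String) (x : Char) : Bool :=
  cs.all (fun ch => !(PySem.Str.len ch == 1 && ch == String.ofList [x]))

theorem length_filter_ne (l : List Char) (c : Char) :
    (l.filter (fun x => x != c)).length = l.length - l.count c := by
  induction l with
  | nil => simp
  | cons d t ih =>
    have hle : t.count c ≤ t.length := List.count_le_length
    by_cases h : d = c
    · subst h
      simp [ih, List.count_cons]
    · simp [h, ih, List.count_cons]
      omega


-- ---- B's fold, characterised over any removal list ----
theorem remove_chars_alt_fold (cs : List String) :
    ∀ (l : List Char) (n : Int),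
      cs.foldl
        (fun (st : String × Int) ch =>
          if PySem.Str.len ch == 1 then
            (PySem.Str.replace st.1 ch "", st.2 + (PySem.Str.count st.1 ch : Int))
          else st)
        (String.ofList l, n)
      = (String.ofList (l.filter (keepPred cs)),
         n + ((l.length : Int) - ((l.filter (keepPred cs)).length : Int))) := by
  induction cs with
  | nil =>
    intro l n
    have hid : l.filter (keepPred []) = l := List.filter_eq_self.mpr (fun a _ => by simp [keepPred])
    simp [hid]
  | cons ch cs ih =>
    intro l n
    by_cases h1 : PySem.Str.len ch = 1
    · -- ch is a single character c
      have hlen : ch.toList.length = 1 := by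
        have := h1
        simp [PySem.Str.len] at this
        exact_mod_cast this
      obtain ⟨c, hc⟩ : ∃ c, ch.toList = [c] := by
        cases hch : ch.toList with
        | nil => simp [hch] at hlen
        | cons a t => cases t with
          | nil => exact ⟨a, rfl⟩
          | cons b t' => simp [hch] at hlen
      have hch : ch = String.ofList [c] := by
        have h2 := congrArg String.ofList hc
        rwa [ofList_toList'] at h2
      subst hch
      have h1b : (PySem.Str.len (String.ofList [c]) == 1) = true := by simp
      have hinj : ∀ x : Char, String.ofList [c] = String.ofList [x] ↔ c = x := by
        intro x
        constructor
        · intro h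
          have h2 := congrArg String.toList h
          simpa using h2
        · intro h; rw [h]
      have hrep : (PySem.Str.replace (String.ofList l) (String.ofList [c]) "").toList
          = l.filter (fun x => x != c) := by simpa using str_replace_single (String.ofList l) c
      have hrep' : PySem.Str.replace (String.ofList l) (String.ofList [c]) ""
          = String.ofList (l.filter (fun x => x != c)) := by
        have h2 := congrArg String.ofList hrep
        rwa [ofList_toList'] at h2
      have hcnt : PySem.Str.count (String.ofList l) (String.ofList [c]) = l.count c := by
        simpa using str_count_single (String.ofList l) c
      have hkp : ∀ x, keepPred (String.ofList [c] :: cs) x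
          = ((x != c) && keepPred cs x) := by
        intro x
        by_cases hx : x = c
        · subst hx
          simp [keepPred, List.all_cons]
        · have hne : ¬ String.ofList [c] = String.ofList [x] := fun h => hx ((hinj x).mp h).symm
          simp [keepPred, List.all_cons, beq_eq_false_iff_ne.mpr hne]
          exact fun _ => hx
      have hfilter : (l.filter (fun x => x != c)).filter (keepPred cs)
          = l.filter (keepPred (String.ofList [c] :: cs)) := by
        rw [List.filter_filter]
        apply List.filter_congr
        intro x _
        rw [hkp x]
        simp [Bool.and_comm]
      have hlf := length_filter_ne l c
      have hcl : l.count c ≤ l.length := List.count_le_length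
      simp only [List.foldl_cons, h1b, if_true, hrep', hcnt]
      rw [ih, hfilter]
      congr 1
      push_cast [hlf]
      omega
    · have hb : (PySem.Str.len ch == 1) = false := beq_eq_false_iff_ne.mpr h1
      have hn : ¬ ch.length = 1 := fun hh => h1 (by simp [PySem.Str.len, hh])
      have hkp : ∀ x, keepPred (ch :: cs) x = keepPred cs x := by
        intro x
        simp [keepPred, List.all_cons, hn]
      have hfe : l.filter (keepPred (ch :: cs)) = l.filter (keepPred cs) :=
        List.filter_congr (fun x _ => hkp x)
      simp only [List.foldl_cons, hb, Bool.false_eq_true, if_false, ih, hfe]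

theorem keepPred_dedup_iff (ctr : List String) (x : Char) :
    keepPred (PySem.List.dedup ctr) x
      = !(PySem.Set.contains (PySem.Set.ofList ctr) (String.ofList [x])) := by
  have hmem : String.ofList [x] ∈ PySem.List.dedup ctr ↔ String.ofList [x] ∈ ctr :=
    PySem.List.mem_dedup ctr (String.ofList [x])
  have hcontains : PySem.Set.contains (PySem.Set.ofList ctr) (String.ofList [x]) = true
      ↔ String.ofList [x] ∈ ctr := by
    simp [PySem.Set.contains, ← PySem.List.dedup_eq_ofList, hmem]
  by_cases h : String.ofList [x] ∈ ctr
  · have hx : String.ofList [x] ∈ PySem.List.dedup ctr := hmem.mpr h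
    have hkp : keepPred (PySem.List.dedup ctr) x = false := by
      simp [keepPred]
      exact h
    rw [hkp, hcontains.mpr h]
    rfl
  · have hkp : keepPred (PySem.List.dedup ctr) x = true := by
      simp only [keepPred, List.all_eq_true]
      intro ch hch
      by_cases hc : ch = String.ofList [x]
      · exact absurd (hmem.mp (hc ▸ hch)) h
      · simp [hc]
    have hcf : PySem.Set.contains (PySem.Set.ofList ctr) (String.ofList [x]) = false := by
      rw [Bool.eq_false_iff]
      intro hc
      exact h (hcontains.mp hc)
    rw [hkp, hcf]
    rfl

-- ===== VERDICT (by name: the statement is the Claim_ definition above) =====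
theorem remove_chars_spec : Claim_equal_remove_chars := by
  intro text chars_to_remove _
  unfold Spec_remove_chars remove_chars remove_chars_alt
  dsimp only
  rw [remove_chars_foldl_inv]
  have hB := remove_chars_alt_fold (PySem.List.dedup chars_to_remove) text.toList 0
  have htext : String.ofList text.toList = text := by simp
  rw [htext] at hB
  rw [hB]
  set q : Char → Bool := fun c => PySem.Set.contains (PySem.Set.ofList chars_to_remove) (String.ofList [c]) with hq
  have hk : keepPred (PySem.List.dedup chars_to_remove) = fun x => ! q x := by
    funext x; rw [keepPred_dedup_iff]
  rw [hk]
  have hsplit : (text.toList.filter q).length + (text.toList.filter (fun c => ! q c)).length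
      = text.toList.length := by
    have := List.length_eq_length_filter_add (l := text.toList) q
    omega
  simp only [Prod.mk.injEq]
  exact ⟨rfl, by omega⟩
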